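-- pv_equiv track=rewrite | github.com/Meenatchinathan/ai-agent-ecommerce-data | app/llm_helper.py | get_fallback_query
-- ===== SOURCE A (Python) =====
-- def get_fallback_query(question: str) -> str:
--     """Schema-aware fallback queries"""
--     question = question.lower()
--
--     if any(word in question for word in ["total", "sum", "sales"]):
--         return "SELECT SUM(total_sales) FROM total_sales_metrics;"
--     elif "highest cpc" in question:
--         return "SELECT product_id, MAX(cost_per_click) FROM ad_sales_metrics GROUP BY product_id ORDER BY MAX(cost_per_click) DESC LIMIT 1;"
--     elif "roas" in question:
--         return "SELECT SUM(ad_sales)/SUM(ad_spend) AS return_on_ad_spend FROM ad_sales_metrics;"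
--     elif "count" in question:
--         return "SELECT COUNT(*) FROM products;"
--     else:
--         return "SELECT * FROM total_sales_metrics LIMIT 5;"
-- ===== SOURCE B (Python) =====
-- # Exhaustive keyword scan: every keyword carries a priority rank; take the
-- # minimum rank among all keywords occurring in the question, then index a
-- # query table (no early return, no per-rule branching).
-- KEYWORD_RANKS = [
--     ("total", 0), ("sum", 0), ("sales", 0),
--     ("highest cpc", 1),
--     ("roas", 2),
--     ("count", 3),
-- ]
-- QUERIES = [
--     "SELECT SUM(total_sales) FROM total_sales_metrics;",
--     "SELECT product_id, MAX(cost_per_click) FROM ad_sales_metrics GROUP BY product_id ORDER BY MAX(cost_per_click) DESC LIMIT 1;",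
--     "SELECT SUM(ad_sales)/SUM(ad_spend) AS return_on_ad_spend FROM ad_sales_metrics;",
--     "SELECT COUNT(*) FROM products;",
--     "SELECT * FROM total_sales_metrics LIMIT 5;",
-- ]
--
-- def get_fallback_query(question: str) -> str:
--     q = question.lower()
--     rank = len(QUERIES) - 1  # default query
--     for keyword, r in KEYWORD_RANKS:
--         if keyword in q and r < rank:
--             rank = r
--     return QUERIES[rank]
-- ===== Notes on version B (the rewrite author's own statement) =====
-- stated objective: alternative
-- what changed: Replaces first-match if-elif early-return dispatch with an exhaustive scan over a flat keyword-to-priority list, taking the minimum matched rank and indexing a query table.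
import Mathlib
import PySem

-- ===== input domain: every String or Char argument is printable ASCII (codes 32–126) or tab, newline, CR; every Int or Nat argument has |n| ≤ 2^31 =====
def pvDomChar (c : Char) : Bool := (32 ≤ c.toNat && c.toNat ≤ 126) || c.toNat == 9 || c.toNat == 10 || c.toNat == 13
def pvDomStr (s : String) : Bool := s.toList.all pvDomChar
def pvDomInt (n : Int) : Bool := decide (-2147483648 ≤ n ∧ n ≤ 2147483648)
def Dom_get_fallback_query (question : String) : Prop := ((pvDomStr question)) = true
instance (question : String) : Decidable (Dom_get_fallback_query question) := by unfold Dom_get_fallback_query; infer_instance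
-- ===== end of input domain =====

-- B replaces the first-match if-elif cascade by an exhaustive min-rank keyword scan over a flat table (objective: alternative).

-- ===== PORT A =====
def get_fallback_query (question : String) : String :=
  let question := PySem.Str.lower question
  if ["total", "sum", "sales"].any (fun word => PySem.Str.isIn word question) then
    "SELECT SUM(total_sales) FROM total_sales_metrics;"
  else if PySem.Str.isIn "highest cpc" question then
    "SELECT product_id, MAX(cost_per_click) FROM ad_sales_metrics GROUP BY product_id ORDER BY MAX(cost_per_click) DESC LIMIT 1;"
  else if PySem.Str.isIn "roas" question then
    "SELECT SUM(ad_sales)/SUM(ad_spend) AS return_on_ad_spend FROM ad_sales_metrics;"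
  else if PySem.Str.isIn "count" question then
    "SELECT COUNT(*) FROM products;"
  else
    "SELECT * FROM total_sales_metrics LIMIT 5;"

-- ===== PORT B =====
def pvKeywordRanks : List (String × Nat) :=
  [("total", 0), ("sum", 0), ("sales", 0), ("highest cpc", 1), ("roas", 2), ("count", 3)]

def pvQueries : List String :=
  [ "SELECT SUM(total_sales) FROM total_sales_metrics;",
    "SELECT product_id, MAX(cost_per_click) FROM ad_sales_metrics GROUP BY product_id ORDER BY MAX(cost_per_click) DESC LIMIT 1;",
    "SELECT SUM(ad_sales)/SUM(ad_spend) AS return_on_ad_spend FROM ad_sales_metrics;",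
    "SELECT COUNT(*) FROM products;",
    "SELECT * FROM total_sales_metrics LIMIT 5;" ]

def get_fallback_query_alt (question : String) : String :=
  let q := PySem.Str.lower question
  let rank := pvKeywordRanks.foldl
    (fun rank kr => if PySem.Str.isIn kr.1 q && kr.2 < rank then kr.2 else rank)
    (pvQueries.length - 1)
  pvQueries.getD rank ""

-- ===== PRECONDITION & SPEC =====
def Spec_get_fallback_query (question : String) (out : String) : Prop := out = get_fallback_query_alt question
instance (question : String) (out : String) : Decidable (Spec_get_fallback_query question out) := by unfold Spec_get_fallback_query; infer_instance

-- ===== CLAIM (what is proved, stated in full; the proofs are below) =====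
def Claim_equal_get_fallback_query : Prop := ∀ (question : String), Dom_get_fallback_query question → Spec_get_fallback_query question (get_fallback_query question)

-- ===== LEMMAS AND PROOFS =====
-- Both results are functions of the six keyword-membership tests on the lowered
-- question: case on each and evaluate both sides in all 64 branches.
theorem pv_dispatch (q : String) :
    (if (["total", "sum", "sales"].any (fun word => PySem.Str.isIn word q)) = true then
      "SELECT SUM(total_sales) FROM total_sales_metrics;"
    else if PySem.Str.isIn "highest cpc" q = true then
      "SELECT product_id, MAX(cost_per_click) FROM ad_sales_metrics GROUP BY product_id ORDER BY MAX(cost_per_click) DESC LIMIT 1;"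
    else if PySem.Str.isIn "roas" q = true then
      "SELECT SUM(ad_sales)/SUM(ad_spend) AS return_on_ad_spend FROM ad_sales_metrics;"
    else if PySem.Str.isIn "count" q = true then
      "SELECT COUNT(*) FROM products;"
    else
      "SELECT * FROM total_sales_metrics LIMIT 5;")
    =
    pvQueries.getD
      (pvKeywordRanks.foldl
        (fun rank kr => if PySem.Str.isIn kr.1 q && kr.2 < rank then kr.2 else rank)
        (pvQueries.length - 1)) "" := by
  by_cases h1 : PySem.Str.isIn "total" q = true <;>
  by_cases h2 : PySem.Str.isIn "sum" q = true <;>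
  by_cases h3 : PySem.Str.isIn "sales" q = true <;>
  by_cases h4 : PySem.Str.isIn "highest cpc" q = true <;>
  by_cases h5 : PySem.Str.isIn "roas" q = true <;>
  by_cases h6 : PySem.Str.isIn "count" q = true <;>
    simp_all [pvKeywordRanks, pvQueries, List.foldl]

-- ===== VERDICT (by name: the statement is the Claim_ definition above) =====
theorem get_fallback_query_spec : Claim_equal_get_fallback_query := by
  intro question _
  unfold Spec_get_fallback_query get_fallback_query get_fallback_query_alt
  exact pv_dispatch (PySem.Str.lower question)
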